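-- pv_equiv track=rewrite | github.com/yifan1207/PT-IT-Model-Differences | src/poc/cross_model/tuned_lens.py | _commitment_from_top1_qualified
-- ===== SOURCE A (Python) =====
-- def _commitment_from_top1_qualified(
--     top1_by_layer: list[int],
--     rank_of_final_by_layer: list[int],
--     top_k: int,
-- ) -> int:
--     """Top-1 commitment with qualification: final token stays in top-K subsequently.
--
--     Earliest layer where top-1 matches final AND in all subsequent layers
--     the final token's rank is <= top_k (i.e. within top-K logits).
--     """
--     n = len(top1_by_layer)
--     final_top1 = top1_by_layer[-1]
--     for i in range(n):
--         if top1_by_layer[i] != final_top1: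
--             continue
--         # Check: top1 matches AND final token stays in top-K for all subsequent
--         qualified = True
--         for j in range(i, n):
--             if top1_by_layer[j] != final_top1:
--                 qualified = False
--                 break
--             if rank_of_final_by_layer[j] > top_k:
--                 qualified = False
--                 break
--         if qualified:
--             return i
--     return n - 1
-- ===== SOURCE B (Python) =====
-- def _commitment_from_top1_qualified(
--     top1_by_layer: list[int],
--     rank_of_final_by_layer: list[int],
--     top_k: int,
-- ) -> int:
--     """Single backward pass: find the start of the longest suffix on which the
--     top-1 token equals the final token and the final token's rank is <= top_k."""
--     n = len(top1_by_layer)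
--     final_top1 = top1_by_layer[-1]
--     i = n
--     for j in range(n - 1, -1, -1):
--         if top1_by_layer[j] == final_top1 and rank_of_final_by_layer[j] <= top_k:
--             i = j
--         else:
--             break
--     return i if i < n else n - 1
-- ===== Notes on version B (the rewrite author's own statement) =====
-- stated objective: alternative
-- what changed: Replaced the forward scan that re-checks the whole suffix for each candidate layer with a single backward pass that finds the start of the longest all-qualified suffix.
import Mathlib
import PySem

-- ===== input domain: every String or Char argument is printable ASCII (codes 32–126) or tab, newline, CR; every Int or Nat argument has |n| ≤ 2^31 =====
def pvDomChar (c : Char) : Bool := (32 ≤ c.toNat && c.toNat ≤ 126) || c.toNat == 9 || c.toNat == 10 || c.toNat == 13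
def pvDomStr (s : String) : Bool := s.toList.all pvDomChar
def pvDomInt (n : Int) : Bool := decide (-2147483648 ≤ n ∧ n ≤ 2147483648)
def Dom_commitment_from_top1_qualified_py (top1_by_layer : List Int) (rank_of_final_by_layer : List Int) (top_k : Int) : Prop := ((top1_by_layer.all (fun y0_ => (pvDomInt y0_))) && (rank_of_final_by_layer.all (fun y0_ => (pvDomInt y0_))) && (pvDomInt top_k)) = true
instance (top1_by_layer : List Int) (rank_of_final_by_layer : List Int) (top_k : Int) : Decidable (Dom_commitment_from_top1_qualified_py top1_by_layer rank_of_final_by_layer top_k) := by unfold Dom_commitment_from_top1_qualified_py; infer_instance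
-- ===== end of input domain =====

-- B replaces A's forward scan with per-layer suffix re-checks by a single backward pass
-- that finds the start of the longest all-qualified suffix (objective: alternative).

-- ===== PORT A =====
-- inner 'for j in range(i, n)' loop of A: fuel = n - j
def pvAInner (top1 rank : List Int) (f k : Int) : Nat → Nat → Bool
  | _, 0 => true
  | j, fuel+1 =>
    if PySem.List.pyGetD top1 (j : Int) 0 ≠ f then false
    else if PySem.List.pyGetD rank (j : Int) 0 > k then false
    else pvAInner top1 rank f k (j+1) fuel

-- outer 'for i in range(n)' loop of A: fuel = n - i; fallthrough returns n - 1
def pvAOuter (top1 rank : List Int) (f k : Int) (n : Nat) : Nat → Nat → Int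
  | _, 0 => (n : Int) - 1
  | i, fuel+1 =>
    if PySem.List.pyGetD top1 (i : Int) 0 ≠ f then pvAOuter top1 rank f k n (i+1) fuel
    else if pvAInner top1 rank f k i (n - i) then (i : Int)
    else pvAOuter top1 rank f k n (i+1) fuel

def commitment_from_top1_qualified_py (top1_by_layer : List Int) (rank_of_final_by_layer : List Int) (top_k : Int) : Int :=
  let n := top1_by_layer.length
  let final_top1 := PySem.List.pyGetD top1_by_layer (-1) 0
  pvAOuter top1_by_layer rank_of_final_by_layer final_top1 top_k n 0 n

-- ===== PORT B =====
-- B's backward 'for j in range(n-1, -1, -1)' loop: first argument is j+1 (0 = loop done);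
-- i is the best start found so far; break on the first unqualified layer
def pvBLoop (top1 rank : List Int) (f k : Int) : Nat → Nat → Nat
  | 0, i => i
  | j+1, i =>
    if PySem.List.pyGetD top1 (j : Int) 0 = f ∧ PySem.List.pyGetD rank (j : Int) 0 ≤ k
    then pvBLoop top1 rank f k j j
    else i

def commitment_from_top1_qualified_py_alt (top1_by_layer : List Int) (rank_of_final_by_layer : List Int) (top_k : Int) : Int :=
  let n := top1_by_layer.length
  let final_top1 := PySem.List.pyGetD top1_by_layer (-1) 0
  let i := pvBLoop top1_by_layer rank_of_final_by_layer final_top1 top_k n n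
  if (i : Int) < (n : Int) then (i : Int) else (n : Int) - 1

-- ===== PRECONDITION & SPEC =====
-- Pre_ excludes exactly the inputs on which Python A raises (IndexError): the empty
-- top1 list (top1_by_layer[-1]) and rank lists shorter than top1 (rank[n-1] is always read before returning).
def Pre_commitment_from_top1_qualified_py (top1_by_layer : List Int) (rank_of_final_by_layer : List Int) (top_k : Int) : Prop :=
  top1_by_layer ≠ [] ∧ top1_by_layer.length ≤ rank_of_final_by_layer.length
instance (top1_by_layer : List Int) (rank_of_final_by_layer : List Int) (top_k : Int) : Decidable (Pre_commitment_from_top1_qualified_py top1_by_layer rank_of_final_by_layer top_k) := by unfold Pre_commitment_from_top1_qualified_py; infer_instance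

def pvWitness_commitment_from_top1_qualified_py : List Int × List Int × Int := ([2, 1, 1], [3, 1, 1], 2)

def Spec_commitment_from_top1_qualified_py (top1_by_layer : List Int) (rank_of_final_by_layer : List Int) (top_k : Int) (out : Int) : Prop := out = commitment_from_top1_qualified_py_alt top1_by_layer rank_of_final_by_layer top_k
instance (top1_by_layer : List Int) (rank_of_final_by_layer : List Int) (top_k : Int) (out : Int) : Decidable (Spec_commitment_from_top1_qualified_py top1_by_layer rank_of_final_by_layer top_k out) := by unfold Spec_commitment_from_top1_qualified_py; infer_instance

-- ===== CLAIM (what is proved, stated in full; the proofs are below) =====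
def Claim_equal_commitment_from_top1_qualified_py : Prop := ∀ (top1_by_layer : List Int) (rank_of_final_by_layer : List Int) (top_k : Int), Dom_commitment_from_top1_qualified_py top1_by_layer rank_of_final_by_layer top_k → Pre_commitment_from_top1_qualified_py top1_by_layer rank_of_final_by_layer top_k → Spec_commitment_from_top1_qualified_py top1_by_layer rank_of_final_by_layer top_k (commitment_from_top1_qualified_py top1_by_layer rank_of_final_by_layer top_k)

-- ===== LEMMAS AND PROOFS =====

-- 'layer j is qualified': top-1 equals the final token and the final token's rank is within top_k
def pvq (top1 rank : List Int) (f k : Int) (j : Nat) : Bool :=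
  decide (PySem.List.pyGetD top1 (j : Int) 0 = f ∧ PySem.List.pyGetD rank (j : Int) 0 ≤ k)

-- length of the maximal all-qualified run of indices ending just below n
def pvTrail (top1 rank : List Int) (f k : Int) : Nat → Nat
  | 0 => 0
  | j+1 => if pvq top1 rank f k j then pvTrail top1 rank f k j + 1 else 0

theorem pvTrail_le (top1 rank : List Int) (f k : Int) (n : Nat) :
    pvTrail top1 rank f k n ≤ n := by
  induction n with
  | zero => simp [pvTrail]
  | succ m ih =>
    simp only [pvTrail]
    split <;> omega

theorem pvTrail_q (top1 rank : List Int) (f k : Int) (n : Nat) :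
    ∀ j, n - pvTrail top1 rank f k n ≤ j → j < n → pvq top1 rank f k j = true := by
  induction n with
  | zero => intro j _ h; omega
  | succ m ih =>
    intro j hge hlt
    simp only [pvTrail] at hge
    by_cases hq : pvq top1 rank f k m = true
    · rw [if_pos hq] at hge
      rcases Nat.lt_succ_iff_lt_or_eq.mp hlt with h | h
      · exact ih j (by have := pvTrail_le top1 rank f k m; omega) h
      · rw [h]; exact hq
    · rw [if_neg hq] at hge; omega

theorem pvTrail_stop (top1 rank : List Int) (f k : Int) (n : Nat)
    (h : pvTrail top1 rank f k n < n) :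
    pvq top1 rank f k (n - pvTrail top1 rank f k n - 1) = false := by
  induction n with
  | zero => omega
  | succ m ih =>
    simp only [pvTrail] at h ⊢
    by_cases hq : pvq top1 rank f k m = true
    · rw [if_pos hq] at h ⊢
      have heq : m + 1 - (pvTrail top1 rank f k m + 1) - 1 = m - pvTrail top1 rank f k m - 1 := by omega
      rw [heq]
      exact ih (by omega)
    · rw [if_neg hq]
      simpa using hq

theorem pvBLoop_eq (top1 rank : List Int) (f k : Int) :
    ∀ jp, pvBLoop top1 rank f k jp jp = jp - pvTrail top1 rank f k jp := by
  intro jp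
  induction jp with
  | zero => simp [pvBLoop, pvTrail]
  | succ j ih =>
    simp only [pvBLoop, pvTrail]
    by_cases hq : pvq top1 rank f k j = true
    · rw [if_pos (by simpa [pvq] using hq), if_pos hq, ih]
      omega
    · rw [if_neg (by simpa [pvq] using hq), if_neg hq]
      omega

theorem pvAInner_true (top1 rank : List Int) (f k : Int) :
    ∀ fuel j, (∀ m, j ≤ m → m < j + fuel → pvq top1 rank f k m = true) →
    pvAInner top1 rank f k j fuel = true := by
  intro fuel
  induction fuel with
  | zero => intro j _; simp [pvAInner]
  | succ fl ih =>
    intro j h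
    have hj : pvq top1 rank f k j = true := h j (le_refl j) (by omega)
    simp only [pvq, decide_eq_true_eq] at hj
    simp only [pvAInner]
    rw [if_neg (by simp [hj.1]), if_neg (by omega)]
    exact ih (j+1) (fun m hm1 hm2 => h m (by omega) (by omega))

theorem pvAInner_false (top1 rank : List Int) (f k : Int) :
    ∀ fuel j m, j ≤ m → m < j + fuel → pvq top1 rank f k m = false →
    pvAInner top1 rank f k j fuel = false := by
  intro fuel
  induction fuel with
  | zero => intro j m _ _ _; omega
  | succ fl ih =>
    intro j m hjm hlt hm
    simp only [pvAInner]
    by_cases hq : pvq top1 rank f k j = true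
    · have hne : j ≠ m := by intro h; rw [h] at hq; rw [hq] at hm; exact Bool.noConfusion hm
      simp only [pvq, decide_eq_true_eq] at hq
      rw [if_neg (by simp [hq.1]), if_neg (by omega)]
      exact ih (j+1) m (by omega) (by omega) hm
    · simp only [pvq, decide_eq_true_eq, not_and_or] at hq
      rcases hq with h1 | h2
      · rw [if_pos h1]
      · by_cases h1 : PySem.List.pyGetD top1 (j : Int) 0 = f
        · rw [if_neg (by simp [h1]), if_pos (by omega)]
        · rw [if_pos h1]

theorem pvAOuter_eq (top1 rank : List Int) (f k : Int) (n : Nat) :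
    ∀ fuel i, i + fuel = n → i ≤ n - pvTrail top1 rank f k n →
    pvAOuter top1 rank f k n i fuel =
      (if pvTrail top1 rank f k n = 0 then (n : Int) - 1
       else ((n - pvTrail top1 rank f k n : Nat) : Int)) := by
  intro fuel
  induction fuel with
  | zero =>
    intro i hi hle
    have ht := pvTrail_le top1 rank f k n
    have h0 : pvTrail top1 rank f k n = 0 := by omega
    rw [if_pos h0]
    rfl
  | succ fl ih =>
    intro i hi hle
    have ht := pvTrail_le top1 rank f k n
    by_cases hcase : i = n - pvTrail top1 rank f k n
    · -- at the start of the qualified suffix: i qualifies and the whole suffix does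
      have htpos : pvTrail top1 rank f k n ≠ 0 := by omega
      have hq : pvq top1 rank f k i = true :=
        pvTrail_q top1 rank f k n i (by omega) (by omega)
      simp only [pvq, decide_eq_true_eq] at hq
      have hinner : pvAInner top1 rank f k i (n - i) = true :=
        pvAInner_true top1 rank f k (n - i) i
          (fun m hm1 hm2 => pvTrail_q top1 rank f k n m (by omega) (by omega))
      simp only [pvAOuter]
      rw [if_neg (by simp [hq.1]), if_pos hinner, if_neg htpos, hcase]
    · -- strictly before the suffix: layer n - trail - 1 disqualifies every candidate here
      have hlt : i < n - pvTrail top1 rank f k n := by omega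
      have hstop : pvq top1 rank f k (n - pvTrail top1 rank f k n - 1) = false :=
        pvTrail_stop top1 rank f k n (by omega)
      have hrec := ih (i+1) (by omega) (by omega)
      simp only [pvAOuter]
      by_cases h1 : PySem.List.pyGetD top1 (i : Int) 0 ≠ f
      · rw [if_pos h1]; exact hrec
      · rw [if_neg h1]
        have hinner : pvAInner top1 rank f k i (n - i) = false :=
          pvAInner_false top1 rank f k (n - i) i (n - pvTrail top1 rank f k n - 1)
            (by omega) (by omega) hstop
        rw [hinner]
        simpa using hrec

-- ===== VERDICT (by name: the statement is the Claim_ definition above) =====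
theorem commitment_from_top1_qualified_py_spec : Claim_equal_commitment_from_top1_qualified_py := by
  intro top1 rank k _ _
  unfold Spec_commitment_from_top1_qualified_py
  show commitment_from_top1_qualified_py top1 rank k = _
  simp only [commitment_from_top1_qualified_py, commitment_from_top1_qualified_py_alt]
  set n := top1.length with hn
  set f := PySem.List.pyGetD top1 (-1) 0 with hf
  have ht := pvTrail_le top1 rank f k n
  rw [pvAOuter_eq top1 rank f k n n 0 (by omega) (by omega)]
  rw [pvBLoop_eq top1 rank f k n]
  by_cases h0 : pvTrail top1 rank f k n = 0
  · simp [h0]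
  · rw [if_neg h0, if_pos (by exact_mod_cast Nat.sub_lt (by omega) (by omega))]
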